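-- pv_equiv track=rewrite | github.com/cye2020/Programmers | Python/구분-스택&큐/크레인 인형뽑기 게임/src/solution1.py | solution
-- ===== SOURCE A (Python) =====
-- class Line:
--     def __init__(self, n):
--         self.n = n
--         self.top = -1
--         self.dolls = []
--
--     def add(self, doll):
--         self.dolls.append(doll)
--         self.top += 1
--
--     def pop(self):
--         if self.top == -1:
--             return 0
--         doll = self.dolls[self.top]
--         self.top -= 1
--         return doll
--
-- def solution(board, moves):
--     stack = []
--     answer = 0
--     N = len(board)
--     M = len(board[0])
--     lines = [Line(i) for i in range(M)]
--     for i in range(N):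
--         for j in range(M):
--             if board[N-i-1][j] != 0:
--                 lines[j].add(board[N-i-1][j])
--
--     for x in moves:
--         doll = lines[x-1].pop()
--         if doll == 0:
--             continue
--         stack.append(doll)
--         if len(stack) >= 2 and stack[-1] == stack[-2]:
--             stack.pop()
--             stack.pop()
--             answer += 2
--     return answer
-- ===== SOURCE B (Python) =====
-- def solution(board, moves):
--     # work on a copy of the first-M columns of the board instead of per-column Line stacks
--     M = len(board[0])
--     grid = [row[:M] for row in board]
--     stack = []
--     answer = 0
--     for x in moves:
--         doll = 0
--         for row in grid:
--             if row[x - 1] != 0: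
--                 doll = row[x - 1]
--                 row[x - 1] = 0
--                 break
--         if doll == 0:
--             continue
--         if stack and stack[-1] == doll:
--             stack.pop()
--             answer += 2
--         else:
--             stack.append(doll)
--     return answer
-- ===== Notes on version B (the rewrite author's own statement) =====
-- stated objective: simpler
-- what changed: B drops the Line class and the upfront per-column stack construction: it copies the board (first M columns), and for each move scans that column top-down for the first nonzero cell, zeroing it; the stack tail checks the match before pushing instead of pushing and popping a pair.
import Mathlib
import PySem

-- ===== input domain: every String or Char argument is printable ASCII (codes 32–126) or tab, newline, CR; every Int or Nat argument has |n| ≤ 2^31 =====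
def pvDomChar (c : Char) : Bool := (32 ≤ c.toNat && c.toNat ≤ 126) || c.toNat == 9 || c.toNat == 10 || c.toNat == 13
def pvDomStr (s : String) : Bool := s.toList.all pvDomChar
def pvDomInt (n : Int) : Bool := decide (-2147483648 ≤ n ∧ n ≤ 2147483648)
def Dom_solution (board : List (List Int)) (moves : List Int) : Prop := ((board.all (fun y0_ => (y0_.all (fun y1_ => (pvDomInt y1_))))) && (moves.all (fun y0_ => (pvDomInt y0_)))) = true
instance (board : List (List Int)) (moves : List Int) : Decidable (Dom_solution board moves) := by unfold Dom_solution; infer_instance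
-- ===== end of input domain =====

-- B replaces A's per-column Line-object stacks with a direct top-down scan of a copied board, and
-- checks the match before pushing instead of push-then-pop (objective: simpler). Equivalence is about
-- the return value; neither program mutates the caller's board (B copies it first).

-- ===== PORT A =====
structure PyLine where
  n : Int
  top : Int
  dolls : List Int
deriving DecidableEq, Repr

def lineAdd (l : PyLine) (doll : Int) : PyLine :=
  { l with dolls := l.dolls ++ [doll], top := l.top + 1 }

-- pop: `self.dolls[self.top]` is in range whenever top ≠ -1 (invariant of the class), so pyGetD is exact
def linePop (l : PyLine) : Int × PyLine :=
  if l.top = -1 then (0, l)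
  else (PySem.List.pyGetD l.dolls l.top 0, { l with top := l.top - 1 })

def solution (board : List (List Int)) (moves : List Int) : Int :=
  let N : Int := board.length
  let M : Int := (PySem.List.pyGetD board 0 []).length
  let lines0 : List PyLine := (PySem.List.pyRange 0 M 1).map (fun i => ⟨i, -1, []⟩)
  let lines1 := (PySem.List.pyRange 0 N 1).foldl (fun ls i =>
      (PySem.List.pyRange 0 M 1).foldl (fun ls j =>
        if PySem.List.pyGetD (PySem.List.pyGetD board (N - i - 1) []) j 0 ≠ 0 then
          PySem.List.pySetD ls j
            (lineAdd (PySem.List.pyGetD ls j ⟨j, -1, []⟩)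
              (PySem.List.pyGetD (PySem.List.pyGetD board (N - i - 1) []) j 0))
        else ls) ls) lines0
  let final := moves.foldl (fun (st : List PyLine × List Int × Int) x =>
      let lines := st.1
      let stack := st.2.1
      let answer := st.2.2
      let res := linePop (PySem.List.pyGetD lines (x - 1) ⟨x - 1, -1, []⟩)
      let lines' := PySem.List.pySetD lines (x - 1) res.2   -- write-back of the in-place `lines[x-1].pop()`
      if res.1 = 0 then (lines', stack, answer)
      else
        let stack' := stack ++ [res.1]
        if 2 ≤ stack'.length ∧ PySem.List.pyGetD stack' (-1) 0 = PySem.List.pyGetD stack' (-2) 0 then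
          (lines', stack'.dropLast.dropLast, answer + 2)
        else (lines', stack', answer)) (lines1, ([], 0))
  final.2.2

-- ===== PORT B =====
-- scan the rows of the copied grid top-down in column x-1; take the first nonzero and zero it
def grabCol (c : Int) : List (List Int) → Int × List (List Int)
  | [] => (0, [])
  | row :: rest =>
    if PySem.List.pyGetD row c 0 ≠ 0 then
      (PySem.List.pyGetD row c 0, PySem.List.pySetD row c 0 :: rest)
    else
      let r := grabCol c rest
      (r.1, row :: r.2)

def solution_alt (board : List (List Int)) (moves : List Int) : Int :=
  let M : Int := (PySem.List.pyGetD board 0 []).length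
  let grid0 := board.map (fun row => PySem.List.slice row none (some M))
  let final := moves.foldl (fun (st : List (List Int) × List Int × Int) x =>
      let r := grabCol (x - 1) st.1
      if r.1 = 0 then (r.2, st.2.1, st.2.2)
      else if st.2.1 ≠ [] ∧ PySem.List.pyGetD st.2.1 (-1) 0 = r.1 then
        (r.2, st.2.1.dropLast, st.2.2 + 2)
      else (r.2, st.2.1 ++ [r.1], st.2.2)) (grid0, ([], 0))
  final.2.2

-- ===== PRECONDITION & SPEC =====
-- Pre_ is exactly where the Python A returns: a nonempty board whose rows all reach the first row's
-- length M (A reads board[i][j] for j < M), and every move x with x-1 in Python's index range [-M, M).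
def Pre_solution (board : List (List Int)) (moves : List Int) : Prop :=
  board ≠ [] ∧
  (∀ row ∈ board, (board.headD []).length ≤ row.length) ∧
  (∀ x ∈ moves, -((board.headD []).length : Int) ≤ x - 1 ∧ x - 1 < ((board.headD []).length : Int))
instance (board : List (List Int)) (moves : List Int) : Decidable (Pre_solution board moves) := by
  unfold Pre_solution; infer_instance

def pvWitness_solution : List (List Int) × List Int :=
  ([[0, 0, 0], [1, 0, 2], [2, 1, 2]], [1, 3, 3, 1, 2, 1])

def Spec_solution (board : List (List Int)) (moves : List Int) (out : Int) : Prop := out = solution_alt board moves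
instance (board : List (List Int)) (moves : List Int) (out : Int) : Decidable (Spec_solution board moves out) := by unfold Spec_solution; infer_instance

-- ===== CLAIM (what is proved, stated in full; the proofs are below) =====
def Claim_equal_solution : Prop := ∀ (board : List (List Int)) (moves : List Int), Dom_solution board moves → Pre_solution board moves → Spec_solution board moves (solution board moves)

-- ===== LEMMAS AND PROOFS =====

-- abstractions used only by the proof
def colNZ (grid : List (List Int)) (k : Nat) : List Int :=
  (grid.map (fun r => r.getD k 0)).filter (fun v => v ≠ 0)

def remLine (l : PyLine) : List Int := (l.dolls.take (l.top + 1).toNat).reverse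

def lineDef : PyLine := ⟨0, -1, []⟩

-- the simulation relation between A's line list and B's grid
def LinesRel (M : Nat) (lines : List PyLine) (grid : List (List Int)) : Prop :=
  lines.length = M ∧ (∀ r ∈ grid, r.length = M) ∧
  ∀ k : Nat, k < M →
    -1 ≤ (lines.getD k lineDef).top ∧
    (lines.getD k lineDef).top < ((lines.getD k lineDef).dolls.length : Int) ∧
    remLine (lines.getD k lineDef) = colNZ grid k

theorem pyGetD_wrap {α : Type} (xs : List α) (d : α) (c : Int) (M : Nat) (h : xs.length = M)
    (h1 : -(M : Int) ≤ c) (h2 : c < (M : Int)) :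
    PySem.List.pyGetD xs c d = xs.getD (if c < 0 then (c + M).toNat else c.toNat) d := by
  simp only [PySem.List.pyGetD, PySem.List.pyGet?, PySem.List.pyIdx?, h]
  by_cases hc : 0 ≤ c
  · rw [if_pos hc, if_pos (by omega), if_neg (by omega)]
    simp [List.getD]
  · rw [if_neg hc, if_pos (by omega), if_pos (by omega)]
    simp only [Option.bind_some, List.getD]
    congr 2
    omega

theorem pySetD_wrap {α : Type} (xs : List α) (v : α) (c : Int) (M : Nat) (h : xs.length = M)
    (h1 : -(M : Int) ≤ c) (h2 : c < (M : Int)) :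
    PySem.List.pySetD xs c v = xs.set (if c < 0 then (c + M).toNat else c.toNat) v := by
  simp only [PySem.List.pySetD, PySem.List.pySet?, PySem.List.pyIdx?, h]
  by_cases hc : 0 ≤ c
  · rw [if_pos hc, if_pos (by omega), if_neg (by omega)]
    simp
  · rw [if_neg hc, if_pos (by omega), if_pos (by omega)]
    simp only [Option.map_some, Option.getD_some]
    congr 1
    omega

theorem colNZ_cons (row : List Int) (rest : List (List Int)) (k : Nat) :
    colNZ (row :: rest) k =
      (if row.getD k 0 ≠ 0 then [row.getD k 0] else []) ++ colNZ rest k := by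
  simp only [colNZ, List.map_cons, List.filter_cons]
  split_ifs with h h2 h3 <;> simp_all

-- what one B-move does to the grid
theorem grabCol_spec (c : Int) (M : Nat) (h1 : -(M : Int) ≤ c) (h2 : c < (M : Int))
    (kc : Nat) (hkc : kc = if c < 0 then (c + M).toNat else c.toNat) :
    ∀ grid : List (List Int), (∀ r ∈ grid, r.length = M) →
      (grabCol c grid).1 = (colNZ grid kc).headD 0 ∧
      (∀ r ∈ (grabCol c grid).2, r.length = M) ∧
      colNZ (grabCol c grid).2 kc = (colNZ grid kc).tail ∧
      (∀ j : Nat, j ≠ kc → colNZ (grabCol c grid).2 j = colNZ grid j) := by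
  have hkcM : kc < M := by subst hkc; split <;> omega
  intro grid
  induction grid with
  | nil => intro _; exact ⟨rfl, by simp [grabCol], by simp [grabCol, colNZ], by simp [grabCol]⟩
  | cons row rest ih =>
    intro hr
    have hrow : row.length = M := hr row (by simp)
    have hrest : ∀ r ∈ rest, r.length = M := fun r hm => hr r (List.mem_cons_of_mem _ hm)
    have hget : PySem.List.pyGetD row c 0 = row.getD kc 0 := by
      rw [pyGetD_wrap row 0 c M hrow h1 h2, hkc]
    have hset : PySem.List.pySetD row c 0 = row.set kc 0 := by
      rw [pySetD_wrap row 0 c M hrow h1 h2, hkc]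
    have hsetD : ∀ j : Nat, j ≠ kc → (row.set kc 0).getD j 0 = row.getD j 0 := by
      intro j hj
      by_cases hjl : j < row.length
      · rw [List.getD_eq_getElem _ _ (by simpa using hjl), List.getD_eq_getElem _ _ hjl]
        exact List.getElem_set_ne (by omega : kc ≠ j) (by simpa using hjl)
      · rw [List.getD_eq_default _ _ (by simpa using Nat.le_of_not_lt hjl),
            List.getD_eq_default _ _ (Nat.le_of_not_lt hjl)]
    have hset_self : (row.set kc 0).getD kc 0 = 0 := by
      rw [List.getD_eq_getElem _ _ (by simp; omega)]
      simp [List.getElem_set_self]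
    by_cases hv : row.getD kc 0 ≠ 0
    · have hg : grabCol c (row :: rest) = (row.getD kc 0, PySem.List.pySetD row c 0 :: rest) := by
        simp only [grabCol]
        rw [hget, if_pos hv]
      rw [hg]
      refine ⟨?_, ?_, ?_, ?_⟩
      · rw [colNZ_cons, if_pos hv]; rfl
      · intro r hm
        rcases List.mem_cons.mp hm with hE | hm2
        · rw [hE, hset]; simpa using hrow
        · exact hrest r hm2
      · rw [hset, colNZ_cons, colNZ_cons, if_pos hv, hset_self]
        simp
      · intro j hj
        rw [hset, colNZ_cons, colNZ_cons, hsetD j hj]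
    · have hg : grabCol c (row :: rest) =
          ((grabCol c rest).1, row :: (grabCol c rest).2) := by
        simp only [grabCol]
        rw [hget, if_neg hv]
      obtain ⟨ih1, ih2, ih3, ih4⟩ := ih hrest
      rw [hg]
      refine ⟨?_, ?_, ?_, ?_⟩
      · rw [colNZ_cons, if_neg hv]
        simpa using ih1
      · intro r hm
        rcases List.mem_cons.mp hm with hE | hm2
        · rw [hE]; exact hrow
        · exact ih2 r hm2
      · rw [colNZ_cons, colNZ_cons, if_neg hv]
        simpa using ih3
      · intro j hj
        rw [colNZ_cons, colNZ_cons]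
        rw [ih4 j hj]

-- A's push-then-double-pop tail equals B's check-then-push tail
theorem stack_step (s : List Int) (d : Int) :
    (if 2 ≤ (s ++ [d]).length ∧
        PySem.List.pyGetD (s ++ [d]) (-1) 0 = PySem.List.pyGetD (s ++ [d]) (-2) 0 then
       ((s ++ [d]).dropLast.dropLast, (2 : Int))
     else (s ++ [d], (0 : Int)))
    = if s ≠ [] ∧ PySem.List.pyGetD s (-1) 0 = d then (s.dropLast, (2 : Int))
      else (s ++ [d], (0 : Int)) := by
  cases s with
  | nil => simp
  | cons a t =>
    have hne : (a :: t) ≠ [] := by simp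
    have h1 : PySem.List.pyGetD ((a :: t) ++ [d]) (-1) 0 = d :=
      PySem.List.pyGetD_neg_one_append_singleton ..
    have h2 : PySem.List.pyGetD ((a :: t) ++ [d]) (-2) 0 = PySem.List.pyGetD (a :: t) (-1) 0 := by
      rw [pyGetD_wrap ((a :: t) ++ [d]) 0 (-2) (t.length + 2) (by simp) (by omega) (by omega),
          pyGetD_wrap (a :: t) 0 (-1) (t.length + 1) (by simp) (by omega) (by omega),
          if_pos (by norm_num), if_pos (by norm_num)]
      have i1 : ((-2 : Int) + ((t.length + 2 : Nat) : Int)).toNat = t.length := by omega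
      have i2 : ((-1 : Int) + ((t.length + 1 : Nat) : Int)).toNat = t.length := by omega
      rw [i1, i2]
      rw [List.getD_eq_getElem _ _ (by simp), List.getD_eq_getElem _ _ (by simp)]
      apply List.getElem_append_left
    rw [h1, h2]
    by_cases heq : PySem.List.pyGetD (a :: t) (-1) 0 = d
    · rw [if_pos ⟨by simp, heq.symm⟩, if_pos ⟨hne, heq⟩]
      rw [List.dropLast_concat]
    · rw [if_neg (fun h => heq h.2.symm), if_neg (fun h => heq h.2)]

-- 'for i in range(N): … board[N-i-1] …' visits the rows back to front
theorem rev_access_map {α : Type} (xs : List α) (d : α) :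
    (PySem.List.pyRange 0 (xs.length : Int) 1).map
        (fun i => PySem.List.pyGetD xs ((xs.length : Int) - i - 1) d)
      = xs.reverse := by
  apply List.ext_getElem
  · simp [PySem.List.length_pyRange_one]
  · intro k h1 h2
    have hk : k < xs.length := by simpa using h2
    simp only [List.getElem_map, List.getElem_reverse]
    have hlen : k < (PySem.List.pyRange 0 (xs.length : Int) 1).length := by
      simp [PySem.List.length_pyRange_one]; omega
    have hi : (PySem.List.pyRange 0 (xs.length : Int) 1)[k]'hlen = (k : Int) := by
      rw [PySem.List.getElem_pyRange_one]; omega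
    rw [hi, pyGetD_wrap xs d _ xs.length rfl (by omega) (by omega),
        if_neg (by omega)]
    rw [List.getD_eq_getElem _ _ (by omega)]
    have : ((xs.length : Int) - k - 1).toNat = xs.length - 1 - k := by omega
    simp [this]

theorem getD_set_ne' {α : Type} (xs : List α) (i k : Nat) (v d : α) (h : k ≠ i) :
    (xs.set i v).getD k d = xs.getD k d := by
  by_cases hk : k < xs.length
  · rw [List.getD_eq_getElem _ _ (by simpa using hk), List.getD_eq_getElem _ _ hk]
    exact List.getElem_set_ne (by omega) (by simpa using hk)
  · rw [List.getD_eq_default _ _ (by simpa using Nat.le_of_not_lt hk),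
        List.getD_eq_default _ _ (Nat.le_of_not_lt hk)]

theorem getD_set_self' {α : Type} (xs : List α) (i : Nat) (v d : α) (h : i < xs.length) :
    (xs.set i v).getD i d = v := by
  rw [List.getD_eq_getElem _ _ (by simpa using h)]
  simp [List.getElem_set_self]

-- proof-side names for the two loops of A's build phase (same bodies as in `solution`)
def innerB (M : Int) (ls : List PyLine) (row : List Int) : List PyLine :=
  (PySem.List.pyRange 0 M 1).foldl (fun ls j =>
    if PySem.List.pyGetD row j 0 ≠ 0 then
      PySem.List.pySetD ls j
        (lineAdd (PySem.List.pyGetD ls j ⟨j, -1, []⟩) (PySem.List.pyGetD row j 0))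
    else ls) ls

-- the inner 'for j in range(M)' loop updates each slot independently
theorem innerFold_getD (row : List Int) (M : Nat) :
    ∀ (a : Nat) (ls : List PyLine), ls.length = M →
      (((PySem.List.pyRange (a : Int) (M : Int) 1).foldl (fun ls j =>
          if PySem.List.pyGetD row j 0 ≠ 0 then
            PySem.List.pySetD ls j
              (lineAdd (PySem.List.pyGetD ls j ⟨j, -1, []⟩) (PySem.List.pyGetD row j 0))
          else ls) ls).length = M ∧
       ∀ k : Nat, k < M →
         ((PySem.List.pyRange (a : Int) (M : Int) 1).foldl (fun ls j =>
            if PySem.List.pyGetD row j 0 ≠ 0 then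
              PySem.List.pySetD ls j
                (lineAdd (PySem.List.pyGetD ls j ⟨j, -1, []⟩) (PySem.List.pyGetD row j 0))
            else ls) ls).getD k lineDef =
           (if a ≤ k ∧ row.getD k 0 ≠ 0 then
             lineAdd (ls.getD k lineDef) (row.getD k 0)
           else ls.getD k lineDef)) := by
  suffices key : ∀ (n a : Nat) (ls : List PyLine), M - a = n → ls.length = M →
      (((PySem.List.pyRange (a : Int) (M : Int) 1).foldl (fun ls j =>
          if PySem.List.pyGetD row j 0 ≠ 0 then
            PySem.List.pySetD ls j
              (lineAdd (PySem.List.pyGetD ls j ⟨j, -1, []⟩) (PySem.List.pyGetD row j 0))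
          else ls) ls).length = M ∧
       ∀ k : Nat, k < M →
         ((PySem.List.pyRange (a : Int) (M : Int) 1).foldl (fun ls j =>
            if PySem.List.pyGetD row j 0 ≠ 0 then
              PySem.List.pySetD ls j
                (lineAdd (PySem.List.pyGetD ls j ⟨j, -1, []⟩) (PySem.List.pyGetD row j 0))
            else ls) ls).getD k lineDef =
           (if a ≤ k ∧ row.getD k 0 ≠ 0 then
             lineAdd (ls.getD k lineDef) (row.getD k 0)
           else ls.getD k lineDef)) by
    intro a ls hlen
    exact key (M - a) a ls rfl hlen
  intro n
  induction n with
  | zero =>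
    intro a ls hn hlen
    rw [PySem.List.pyRange_one_eq_nil (by omega)]
    simp only [List.foldl_nil]
    exact ⟨hlen, fun k hk => by rw [if_neg (by omega)]⟩
  | succ n ih =>
    intro a ls hn hlen
    have ha : (a : Int) < (M : Int) := by omega
    rw [PySem.List.pyRange_one_cons (by omega)]
    simp only [List.foldl_cons]
    have haM : a < M := by omega
    -- evaluate the first iteration
    have hbody : (if PySem.List.pyGetD row (a : Int) 0 ≠ 0 then
          PySem.List.pySetD ls (a : Int)
            (lineAdd (PySem.List.pyGetD ls (a : Int) ⟨(a : Int), -1, []⟩)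
              (PySem.List.pyGetD row (a : Int) 0))
        else ls) =
        (if row.getD a 0 ≠ 0 then
          ls.set a (lineAdd (ls.getD a lineDef) (row.getD a 0)) else ls) := by
      have hcond : PySem.List.pyGetD row (a : Int) 0 = row.getD a 0 := by simp
      have hgetls : PySem.List.pyGetD ls (a : Int) ⟨(a : Int), -1, []⟩ = ls.getD a lineDef := by
        simp only [PySem.List.pyGetD_natCast]
        rw [List.getD_eq_getElem _ _ (by omega), List.getD_eq_getElem _ _ (by omega)]
      have hsetls : ∀ v : PyLine, PySem.List.pySetD ls (a : Int) v = ls.set a v := by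
        intro v
        rw [pySetD_wrap ls v (a : Int) M hlen (by omega) (by omega), if_neg (by omega)]
        simp
      rw [hcond, hgetls, hsetls]
    rw [hbody]
    set ls₁ := (if row.getD a 0 ≠ 0 then
        ls.set a (lineAdd (ls.getD a lineDef) (row.getD a 0)) else ls) with hls₁
    have hlen1 : ls₁.length = M := by
      rw [hls₁]; split <;> simp [hlen]
    have hcast : ((a : Int) + 1) = ((a + 1 : Nat) : Int) := by push_cast; ring
    rw [hcast]
    obtain ⟨hL, hpt⟩ := ih (a + 1) ls₁ (by omega) hlen1
    refine ⟨hL, fun k hk => ?_⟩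
    rw [hpt k hk]
    have hget1 : ∀ hk2 : k ≠ a, ls₁.getD k lineDef = ls.getD k lineDef := by
      intro hk2
      rw [hls₁]; split
      · exact getD_set_ne' ls a k _ lineDef hk2
      · rfl
    by_cases hka : k = a
    · subst hka
      rw [if_neg (by omega)]
      rw [hls₁]
      by_cases hrow : row.getD k 0 ≠ 0
      · rw [if_pos hrow, if_pos ⟨le_refl _, hrow⟩]
        exact getD_set_self' ls k _ lineDef (by omega)
      · rw [if_neg hrow, if_neg (by tauto)]
    · rw [hget1 hka]
      by_cases hak : a ≤ k
      · by_cases hrow : row.getD k 0 ≠ 0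
        · rw [if_pos ⟨by omega, hrow⟩, if_pos ⟨hak, hrow⟩]
        · rw [if_neg (by tauto), if_neg (by tauto)]
      · rw [if_neg (by intro h; exact absurd h.1 (by omega)),
            if_neg (by intro h; exact absurd h.1 (by omega))]

-- the build loop, row list processed bottom-up, appends each row's nonzero column entries
theorem build_fold (M : Nat) :
    ∀ (rows : List (List Int)) (ls : List PyLine) (ds : Nat → List Int),
      ls.length = M →
      (∀ k : Nat, k < M → ls.getD k lineDef =
        ⟨(ls.getD k lineDef).n, ((ds k).length : Int) - 1, ds k⟩) →
      (rows.foldl (innerB (M : Int)) ls).length = M ∧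
      ∀ k : Nat, k < M →
        (rows.foldl (innerB (M : Int)) ls).getD k lineDef =
          ⟨((rows.foldl (innerB (M : Int)) ls).getD k lineDef).n,
           ((ds k ++ (rows.map (fun r => r.getD k 0)).filter (fun v => v ≠ 0)).length : Int) - 1,
           ds k ++ (rows.map (fun r => r.getD k 0)).filter (fun v => v ≠ 0)⟩ := by
  intro rows
  induction rows with
  | nil =>
    intro ls ds hlen hshape
    refine ⟨by simpa using hlen, fun k hk => ?_⟩
    simpa using hshape k hk
  | cons row rest ih =>
    intro ls ds hlen hshape
    rw [List.foldl_cons]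
    have hinner := innerFold_getD row M 0 ls hlen
    simp only [Nat.cast_zero] at hinner
    have hinner' : (innerB (M : Int) ls row).length = M ∧ ∀ k : Nat, k < M →
        (innerB (M : Int) ls row).getD k lineDef =
          (if 0 ≤ k ∧ row.getD k 0 ≠ 0 then
            lineAdd (ls.getD k lineDef) (row.getD k 0)
          else ls.getD k lineDef) := hinner
    obtain ⟨hlen1, hpt1⟩ := hinner'
    have step : ∀ k : Nat, k < M → (innerB (M : Int) ls row).getD k lineDef =
        ⟨((innerB (M : Int) ls row).getD k lineDef).n,
         (((ds k ++ if row.getD k 0 ≠ 0 then [row.getD k 0] else []).length : Nat) : Int) - 1,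
         ds k ++ if row.getD k 0 ≠ 0 then [row.getD k 0] else []⟩ := by
      intro k hk
      rw [hpt1 k hk]
      by_cases hrow : row.getD k 0 ≠ 0
      · rw [if_pos ⟨Nat.zero_le k, hrow⟩, if_pos hrow, hshape k hk]
        simp [lineAdd]
      · rw [if_neg (by tauto), if_neg hrow, hshape k hk]
        simp
    obtain ⟨hL, hptf⟩ := ih (innerB (M : Int) ls row)
      (fun k => ds k ++ if row.getD k 0 ≠ 0 then [row.getD k 0] else []) hlen1 step
    refine ⟨hL, fun k hk => ?_⟩
    rw [hptf k hk]
    have hds : (ds k ++ if row.getD k 0 ≠ 0 then [row.getD k 0] else []) ++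
        (rest.map (fun r => r.getD k 0)).filter (fun v => v ≠ 0) =
        ds k ++ ((row :: rest).map (fun r => r.getD k 0)).filter (fun v => v ≠ 0) := by
      rw [List.map_cons, List.filter_cons, List.append_assoc]
      by_cases hrow : row.getD k 0 ≠ 0
      · rw [if_pos hrow, if_pos (by simpa using hrow)]
        rfl
      · rw [if_neg hrow, if_neg (by simpa using hrow)]
        rfl
    rw [hds]

-- two folds over the same move list stay related step by step
theorem foldl_sim {σA σB : Type} (f : σA → Int → σA) (g : σB → Int → σB)
    (R : σA → σB → Prop) (P : Int → Prop)
    (hstep : ∀ a b x, P x → R a b → R (f a x) (g b x)) :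
    ∀ (moves : List Int), (∀ x ∈ moves, P x) → ∀ a b, R a b →
      R (moves.foldl f a) (moves.foldl g b) := by
  intro moves
  induction moves with
  | nil => intro _ a b h; simpa using h
  | cons x xs ih =>
    intro hP a b h
    simp only [List.foldl_cons]
    exact ih (fun y hy => hP y (List.mem_cons_of_mem _ hy)) _ _
      (hstep a b x (hP x List.mem_cons_self) h)

-- proof-side names for the two per-move fold bodies (same bodies as in the ports)
def aStep (st : List PyLine × List Int × Int) (x : Int) : List PyLine × List Int × Int :=
  let lines := st.1
  let stack := st.2.1
  let answer := st.2.2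
  let res := linePop (PySem.List.pyGetD lines (x - 1) ⟨x - 1, -1, []⟩)
  let lines' := PySem.List.pySetD lines (x - 1) res.2
  if res.1 = 0 then (lines', stack, answer)
  else
    let stack' := stack ++ [res.1]
    if 2 ≤ stack'.length ∧ PySem.List.pyGetD stack' (-1) 0 = PySem.List.pyGetD stack' (-2) 0 then
      (lines', stack'.dropLast.dropLast, answer + 2)
    else (lines', stack', answer)

def bStep (st : List (List Int) × List Int × Int) (x : Int) : List (List Int) × List Int × Int :=
  let r := grabCol (x - 1) st.1
  if r.1 = 0 then (r.2, st.2.1, st.2.2)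
  else if st.2.1 ≠ [] ∧ PySem.List.pyGetD st.2.1 (-1) 0 = r.1 then
    (r.2, st.2.1.dropLast, st.2.2 + 2)
  else (r.2, st.2.1 ++ [r.1], st.2.2)

theorem stack_step_pos (s : List Int) (d : Int) (hc : s ≠ [] ∧ PySem.List.pyGetD s (-1) 0 = d) :
    (2 ≤ (s ++ [d]).length ∧
      PySem.List.pyGetD (s ++ [d]) (-1) 0 = PySem.List.pyGetD (s ++ [d]) (-2) 0) ∧
    (s ++ [d]).dropLast.dropLast = s.dropLast := by
  have h := stack_step s d
  rw [if_pos hc] at h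
  by_cases hcond : 2 ≤ (s ++ [d]).length ∧
      PySem.List.pyGetD (s ++ [d]) (-1) 0 = PySem.List.pyGetD (s ++ [d]) (-2) 0
  · rw [if_pos hcond] at h
    exact ⟨hcond, congrArg Prod.fst h⟩
  · rw [if_neg hcond] at h
    exact absurd (congrArg Prod.snd h) (by norm_num)

theorem stack_step_neg (s : List Int) (d : Int)
    (hc : ¬(s ≠ [] ∧ PySem.List.pyGetD s (-1) 0 = d)) :
    ¬(2 ≤ (s ++ [d]).length ∧
      PySem.List.pyGetD (s ++ [d]) (-1) 0 = PySem.List.pyGetD (s ++ [d]) (-2) 0) := by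
  have h := stack_step s d
  rw [if_neg hc] at h
  intro hcond
  rw [if_pos hcond] at h
  exact absurd (congrArg Prod.snd h) (by norm_num)

theorem move_step (M : Nat) (x : Int) (hx1 : -(M : Int) ≤ x - 1) (hx2 : x - 1 < (M : Int))
    (lines : List PyLine) (grid : List (List Int)) (stack : List Int) (answer : Int)
    (hrel : LinesRel M lines grid) :
    (aStep (lines, stack, answer) x).2 = (bStep (grid, stack, answer) x).2 ∧
    LinesRel M (aStep (lines, stack, answer) x).1 (bStep (grid, stack, answer) x).1 := by
  obtain ⟨hlenL, hrows, hk⟩ := hrel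
  set kc : Nat := if x - 1 < 0 then (x - 1 + M).toNat else (x - 1).toNat with hkc
  have hkcM : kc < M := by rw [hkc]; split <;> omega
  have hgetline : PySem.List.pyGetD lines (x - 1) ⟨x - 1, -1, []⟩ = lines.getD kc lineDef := by
    rw [pyGetD_wrap lines ⟨x - 1, -1, []⟩ (x - 1) M hlenL hx1 hx2, ← hkc]
    rw [List.getD_eq_getElem _ _ (by omega), List.getD_eq_getElem _ _ (by omega)]
  have hsetline : ∀ v : PyLine, PySem.List.pySetD lines (x - 1) v = lines.set kc v := by
    intro v; rw [pySetD_wrap lines v (x - 1) M hlenL hx1 hx2, ← hkc]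
  obtain ⟨htop1, htop2, hrem⟩ := hk kc hkcM
  obtain ⟨hg1, hg2, hg3, hg4⟩ := grabCol_spec (x - 1) M hx1 hx2 kc hkc grid hrows
  set l := lines.getD kc lineDef with hl
  have hrelset : ∀ l' : PyLine, -1 ≤ l'.top → (l'.top < (l'.dolls.length : Int)) →
      remLine l' = colNZ (grabCol (x - 1) grid).2 kc →
      LinesRel M (lines.set kc l') (grabCol (x - 1) grid).2 := by
    intro l' hb1 hb2 hb3
    refine ⟨by simpa using hlenL, hg2, fun k hkM => ?_⟩
    by_cases hke : k = kc
    · subst hke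
      rw [getD_set_self' lines kc l' lineDef (by omega)]
      exact ⟨hb1, hb2, hb3⟩
    · rw [getD_set_ne' lines kc k l' lineDef hke]
      obtain ⟨u1, u2, u3⟩ := hk k hkM
      exact ⟨u1, u2, by rw [u3, hg4 k hke]⟩
  by_cases hempty : l.top = -1
  · have hremnil : remLine l = [] := by unfold remLine; rw [hempty]; simp
    have hcol : colNZ grid kc = [] := by rw [← hrem, hremnil]
    have hpop : linePop l = (0, l) := by unfold linePop; rw [if_pos hempty]
    have hdollB : (grabCol (x - 1) grid).1 = 0 := by rw [hg1, hcol]; rfl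
    have ha : aStep (lines, stack, answer) x = (lines.set kc l, stack, answer) := by
      simp only [aStep]
      rw [hgetline, hpop, hsetline]
      simp
    have hb : bStep (grid, stack, answer) x =
        ((grabCol (x - 1) grid).2, stack, answer) := by
      simp only [bStep]
      rw [hdollB]
      simp
    rw [ha, hb]
    refine ⟨rfl, hrelset l htop1 htop2 ?_⟩
    rw [hg3, hcol, hremnil]
    rfl
  · have ht0 : 0 ≤ l.top := by omega
    have htlt : l.top.toNat < l.dolls.length := by omega
    have htake : l.dolls.take (l.top + 1).toNat =
        l.dolls.take l.top.toNat ++ [l.dolls[l.top.toNat]'htlt] := by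
      have he : (l.top + 1).toNat = l.top.toNat + 1 := by omega
      rw [he, List.take_add_one]
      congr
      rw [List.getElem?_eq_getElem htlt]
      rfl
    have hremcons : remLine l =
        l.dolls[l.top.toNat]'htlt :: (l.dolls.take l.top.toNat).reverse := by
      unfold remLine; rw [htake]; simp
    have hdoll : PySem.List.pyGetD l.dolls l.top 0 = l.dolls[l.top.toNat]'htlt := by
      rw [pyGetD_wrap l.dolls 0 l.top l.dolls.length rfl (by omega) (by omega),
          if_neg (by omega)]
      rw [List.getD_eq_getElem _ _ (by omega)]
    have hcolcons : colNZ grid kc =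
        l.dolls[l.top.toNat]'htlt :: (l.dolls.take l.top.toNat).reverse := by
      rw [← hrem, hremcons]
    have hdoll0 : l.dolls[l.top.toNat]'htlt ≠ 0 := by
      have hmem : l.dolls[l.top.toNat]'htlt ∈ colNZ grid kc := by
        rw [hcolcons]; exact List.mem_cons_self
      unfold colNZ at hmem
      have := List.of_mem_filter hmem
      simpa using this
    have hpop : linePop l = (l.dolls[l.top.toNat]'htlt, { l with top := l.top - 1 }) := by
      unfold linePop
      rw [if_neg hempty, hdoll]
    have hg1' : (grabCol (x - 1) grid).1 = l.dolls[l.top.toNat]'htlt := by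
      rw [hg1, hcolcons]; rfl
    have hremtail : remLine { l with top := l.top - 1 } =
        colNZ (grabCol (x - 1) grid).2 kc := by
      rw [hg3, hcolcons]
      unfold remLine
      have he : (l.top - 1 + 1).toNat = l.top.toNat := by omega
      simp only [he]
      rfl
    have hb2' : ({ l with top := l.top - 1 } : PyLine).top <
        (({ l with top := l.top - 1 } : PyLine).dolls.length : Int) := by
      simp; omega
    by_cases hc : stack ≠ [] ∧ PySem.List.pyGetD stack (-1) 0 = l.dolls[l.top.toNat]'htlt
    · obtain ⟨hcondA, hdrop⟩ := stack_step_pos stack _ hc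
      have ha : aStep (lines, stack, answer) x =
          (lines.set kc { l with top := l.top - 1 }, stack.dropLast, answer + 2) := by
        simp only [aStep]
        rw [hgetline, hpop, hsetline]
        dsimp only
        rw [if_neg hdoll0, if_pos hcondA, hdrop]
      have hb : bStep (grid, stack, answer) x =
          ((grabCol (x - 1) grid).2, stack.dropLast, answer + 2) := by
        simp only [bStep]
        rw [hg1', if_neg hdoll0, if_pos hc]
      rw [ha, hb]
      exact ⟨rfl, hrelset _ (by simp; omega) hb2' hremtail⟩
    · have hcondA := stack_step_neg stack _ hc
      have ha : aStep (lines, stack, answer) x =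
          (lines.set kc { l with top := l.top - 1 }, stack ++ [l.dolls[l.top.toNat]'htlt],
            answer) := by
        simp only [aStep]
        rw [hgetline, hpop, hsetline]
        dsimp only
        rw [if_neg hdoll0, if_neg hcondA]
      have hb : bStep (grid, stack, answer) x =
          ((grabCol (x - 1) grid).2, stack ++ [l.dolls[l.top.toNat]'htlt], answer) := by
        simp only [bStep]
        rw [hg1', if_neg hdoll0, if_neg hc]
      rw [ha, hb]
      exact ⟨rfl, hrelset _ (by simp; omega) hb2' hremtail⟩

-- the built lines relate to the sliced grid
theorem init_rel (board : List (List Int))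
    (hrows : ∀ row ∈ board, (board.headD []).length ≤ row.length) :
    LinesRel (board.headD []).length
      (board.reverse.foldl (innerB (((board.headD []).length : Nat) : Int))
        ((PySem.List.pyRange 0 (((board.headD []).length : Nat) : Int) 1).map
          (fun i => ⟨i, -1, []⟩)))
      (board.map (fun row =>
        PySem.List.slice row none (some (((board.headD []).length : Nat) : Int)))) := by
  set M : Nat := (board.headD []).length with hM
  have hgrid : ∀ r ∈ board.map (fun row => PySem.List.slice row none (some (M : Int))),
      r.length = M := by
    intro r hr
    obtain ⟨row, hrow, rfl⟩ := List.mem_map.mp hr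
    rw [PySem.List.slice_to_natCast]
    simp only [List.length_take]
    exact Nat.min_eq_left (hrows row hrow)
  have hlen0 : ((PySem.List.pyRange 0 (M : Int) 1).map
      (fun i => (⟨i, -1, []⟩ : PyLine))).length = M := by
    simp [PySem.List.length_pyRange_one]
  have hshape0 : ∀ k : Nat, k < M →
      ((PySem.List.pyRange 0 (M : Int) 1).map (fun i => (⟨i, -1, []⟩ : PyLine))).getD k lineDef =
        ⟨(((PySem.List.pyRange 0 (M : Int) 1).map
            (fun i => (⟨i, -1, []⟩ : PyLine))).getD k lineDef).n,
         ((([] : List Int).length : Int)) - 1, ([] : List Int)⟩ := by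
    intro k hk
    rw [List.getD_eq_getElem _ _ (by simpa [PySem.List.length_pyRange_one] using hk)]
    rw [List.getElem_map]
    simp
  obtain ⟨hL, hpt⟩ := build_fold M board.reverse _ (fun _ => []) hlen0 hshape0
  refine ⟨hL, hgrid, fun k hk => ?_⟩
  rw [hpt k hk]
  set d : List Int := [] ++ (board.reverse.map (fun r => r.getD k 0)).filter (fun v => v ≠ 0)
    with hd
  refine ⟨by push_cast; omega, by push_cast; omega, ?_⟩
  unfold remLine
  simp only
  have htk : ((d.length : Int) - 1 + 1).toNat = d.length := by omega
  rw [htk, List.take_length]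
  -- d.reverse = colNZ grid0 k
  rw [hd]
  simp only [List.nil_append]
  rw [← List.filter_reverse, ← List.map_reverse, List.reverse_reverse]
  unfold colNZ
  rw [List.map_map]
  congr 1
  apply List.map_congr_left
  intro row hrow
  simp only [Function.comp]
  rw [PySem.List.slice_to_natCast]
  have hkM : k < (row.take M).length := by
    simp only [List.length_take]
    have := hrows row hrow
    omega
  rw [List.getD_eq_getElem _ _ hkM, List.getD_eq_getElem _ _ (by have := hrows row hrow; omega)]
  exact (List.getElem_take).symm

theorem solution_spec : Claim_equal_solution := by
  intro board moves hdom hpre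
  obtain ⟨hne, hrows, hmv⟩ := hpre
  show solution board moves = solution_alt board moves
  have hb0 : PySem.List.pyGetD board 0 [] = board.headD [] := by
    cases board with
    | nil => exact absurd rfl hne
    | cons b bs => simp [PySem.List.pyGetD_zero_cons]
  have hA : solution board moves =
      (moves.foldl aStep
        ((PySem.List.pyRange 0 (board.length : Int) 1).foldl
          (fun ls i => innerB ((PySem.List.pyGetD board 0 []).length : Int) ls
            (PySem.List.pyGetD board ((board.length : Int) - i - 1) []))
          ((PySem.List.pyRange 0 ((PySem.List.pyGetD board 0 []).length : Int) 1).map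
            (fun i => ⟨i, -1, []⟩)), ([], 0))).2.2 := rfl
  have hB : solution_alt board moves =
      (moves.foldl bStep
        (board.map (fun row =>
          PySem.List.slice row none (some ((PySem.List.pyGetD board 0 []).length : Int))),
          ([], 0))).2.2 := rfl
  rw [hA, hB, hb0]
  set M : Nat := (board.headD []).length with hM
  have houter : (PySem.List.pyRange 0 (board.length : Int) 1).foldl
      (fun ls i => innerB (M : Int) ls
        (PySem.List.pyGetD board ((board.length : Int) - i - 1) []))
      ((PySem.List.pyRange 0 (M : Int) 1).map (fun i => ⟨i, -1, []⟩)) =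
      board.reverse.foldl (innerB (M : Int))
        ((PySem.List.pyRange 0 (M : Int) 1).map (fun i => ⟨i, -1, []⟩)) := by
    conv_rhs => rw [← rev_access_map board []]
    rw [List.foldl_map]
  rw [houter]
  have hinit := init_rel board hrows
  rw [← hM] at hinit
  have hsim := foldl_sim aStep bStep
    (fun sa sb => sa.2 = sb.2 ∧ LinesRel M sa.1 sb.1)
    (fun x => -(M : Int) ≤ x - 1 ∧ x - 1 < (M : Int))
    (fun a b x hx h => by
      rcases a with ⟨la, sa, na⟩
      rcases b with ⟨gb, sb, nb⟩
      rcases h with ⟨hst, hrel⟩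
      injection hst with h1 h2
      subst h1
      subst h2
      exact move_step M x hx.1 hx.2 la gb sa na hrel)
    moves hmv
    (board.reverse.foldl (innerB (M : Int))
      ((PySem.List.pyRange 0 (M : Int) 1).map (fun i => ⟨i, -1, []⟩)), ([], 0))
    (board.map (fun row => PySem.List.slice row none (some (M : Int))), ([], 0))
    ⟨rfl, hinit⟩
  exact congrArg Prod.snd hsim.1
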